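-- pv_equiv track=rewrite | github.com/lixxlim/algorithm-practice | python/250517_S5_15312.py | name_compatibility
-- ===== SOURCE A (Python) =====
-- def name_compatibility(lst):
--     ret = []
--     size = len(lst)
--     if size <= 2:
--         return f"{lst[0]}{lst[1]}"
--     for i in range(0, size-1):
--         ret.append((lst[i] + lst[i+1]) % 10)
--     return name_compatibility(ret)
-- ===== SOURCE B (Python) =====
-- def name_compatibility(lst):
--     n = len(lst)
--     if n <= 2:
--         return f"{lst[0]}{lst[1]}"
--     m = n - 2
--     a = b = 0
--     c = 1
--     for i in range(m + 1):
--         a += c * lst[i]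
--         b += c * lst[i + 1]
--         c = c * (m - i) // (i + 1)
--     return f"{a % 10}{b % 10}"
-- ===== Notes on version B (the rewrite author's own statement) =====
-- stated objective: faster
-- what changed: Replaces the recursive O(n^2) pairwise-sum-mod-10 reduction of the whole triangle by a single closed-form pass that computes the two surviving digits as binomial-coefficient weighted sums (a = sum C(n-2,i)*lst[i], b = sum C(n-2,i)*lst[i+1]) taken mod 10.
import Mathlib
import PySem

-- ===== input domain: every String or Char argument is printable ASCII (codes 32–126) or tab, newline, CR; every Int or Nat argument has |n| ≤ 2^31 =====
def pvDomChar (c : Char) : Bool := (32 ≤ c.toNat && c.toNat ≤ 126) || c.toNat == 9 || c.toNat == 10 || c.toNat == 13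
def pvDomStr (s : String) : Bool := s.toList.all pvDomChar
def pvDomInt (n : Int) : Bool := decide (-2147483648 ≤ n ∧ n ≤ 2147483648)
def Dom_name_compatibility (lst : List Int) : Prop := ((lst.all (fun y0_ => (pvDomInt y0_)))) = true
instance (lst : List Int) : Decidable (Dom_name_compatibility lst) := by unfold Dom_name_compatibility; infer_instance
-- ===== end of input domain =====

-- B replaces A's recursive pairwise-mod-10 triangle reduction by one closed-form pass with
-- binomial-coefficient weights; equivalence of return values is proved below.

-- ===== PORT A =====
-- one reduction round: ret = []; for i in range(0, size-1): ret.append((lst[i]+lst[i+1]) % 10)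
def pvPairRow (lst : List Int) : List Int :=
  (PySem.List.pyRange 0 ((lst.length : Int) - 1) 1).foldl
    (fun ret i =>
      ret ++ [PySem.Int.mod (PySem.List.pyGetD lst i 0 + PySem.List.pyGetD lst (i + 1) 0) 10]) []

-- length fact cited by the recursion below for termination
theorem pvPairRow_length (lst : List Int) : (pvPairRow lst).length = lst.length - 1 := by
  unfold pvPairRow
  rw [PySem.List.foldl_append_singleton_eq_map]
  simp [PySem.List.length_pyRange_one]

def name_compatibility (lst : List Int) : String :=
  if ((lst.length : Int) ≤ 2) then
    PySem.Int.toStr (PySem.List.pyGetD lst 0 0) ++ PySem.Int.toStr (PySem.List.pyGetD lst 1 0)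
  else
    name_compatibility (pvPairRow lst)
termination_by lst.length
decreasing_by
  rw [pvPairRow_length]; omega

-- ===== PORT B =====
def name_compatibility_alt (lst : List Int) : String :=
  let n : Int := lst.length
  if n ≤ 2 then
    PySem.Int.toStr (PySem.List.pyGetD lst 0 0) ++ PySem.Int.toStr (PySem.List.pyGetD lst 1 0)
  else
    let m : Int := n - 2
    let st :=
      (PySem.List.pyRange 0 (m + 1) 1).foldl
        (fun (st : Int × Int × Int) i =>
          (st.1 + st.2.2 * PySem.List.pyGetD lst i 0,
           st.2.1 + st.2.2 * PySem.List.pyGetD lst (i + 1) 0,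
           PySem.Int.floordiv (st.2.2 * (m - i)) (i + 1)))
        (0, 0, 1)
    PySem.Int.toStr (PySem.Int.mod st.1 10) ++ PySem.Int.toStr (PySem.Int.mod st.2.1 10)

-- ===== PRECONDITION & SPEC =====
-- Pre_ excludes lists of length 0 or 1, on which Python A raises IndexError (lst[0]/lst[1]).
def Pre_name_compatibility (lst : List Int) : Prop := 2 ≤ lst.length
instance (lst : List Int) : Decidable (Pre_name_compatibility lst) := by
  unfold Pre_name_compatibility; infer_instance
def pvWitness_name_compatibility : List Int := [3, 1, 4, 1, 5]

def Spec_name_compatibility (lst : List Int) (out : String) : Prop := out = name_compatibility_alt lst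
instance (lst : List Int) (out : String) : Decidable (Spec_name_compatibility lst out) := by
  unfold Spec_name_compatibility; infer_instance

-- ===== CLAIM (what is proved, stated in full; the proofs are below) =====
def Claim_equal_name_compatibility : Prop := ∀ (lst : List Int), Dom_name_compatibility lst → Pre_name_compatibility lst → Spec_name_compatibility lst (name_compatibility lst)

-- ===== LEMMAS AND PROOFS =====

-- the binomial weighted sum  Σ_{i≤m} C(m,i) * lst[i+off]  both programs compute mod 10
def pvS (m off : Nat) (l : List Int) : Int :=
  ∑ i ∈ Finset.range (m + 1), ((m.choose i : Nat) : Int) * l.getD (i + off) 0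

theorem pvS_pascal (m off : Nat) (l : List Int) :
    pvS (m + 1) off l = pvS m off l + pvS m (off + 1) l := by
  unfold pvS
  rw [Finset.sum_range_succ' (fun i => (((m + 1).choose i : Nat) : Int) * l.getD (i + off) 0),
      Finset.sum_range_succ' (fun i => ((m.choose i : Nat) : Int) * l.getD (i + off) 0)]
  have h2 : ∑ i ∈ Finset.range (m + 1), ((m.choose i : Nat) : Int) * l.getD (i + (off + 1)) 0
      = ∑ i ∈ Finset.range (m + 1), ((m.choose i : Nat) : Int) * l.getD (i + 1 + off) 0 := by
    apply Finset.sum_congr rfl; intro i _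
    have hidx : i + (off + 1) = i + 1 + off := by omega
    rw [hidx]
  rw [h2]
  have h3 : ∑ i ∈ Finset.range (m + 1), ((m.choose (i + 1) : Nat) : Int) * l.getD (i + 1 + off) 0
      = ∑ i ∈ Finset.range m, ((m.choose (i + 1) : Nat) : Int) * l.getD (i + 1 + off) 0 := by
    rw [Finset.sum_range_succ]
    simp
  simp only [Nat.choose_succ_succ]
  push_cast
  simp only [add_mul, Finset.sum_add_distrib]
  rw [← h3]
  simp [Nat.choose_zero_right]
  ring

theorem pvPairRow_getD (l : List Int) (i : Nat) (h : i < l.length - 1) :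
    (pvPairRow l).getD i 0 = PySem.Int.mod (l.getD i 0 + l.getD (i + 1) 0) 10 := by
  unfold pvPairRow
  rw [PySem.List.foldl_append_singleton_eq_map]
  rw [List.getD_eq_getElem?_getD, List.nil_append, List.getElem?_map,
      PySem.List.getElem?_pyRange_one]
  have hi : i < ((l.length : Int) - 1 - 0).toNat := by omega
  rw [if_pos hi]
  simp only [Option.map_some, Option.getD_some, zero_add]
  have h1 : PySem.List.pyGetD l (i : Int) 0 = l.getD i 0 := by
    simp [PySem.List.pyGetD_natCast]
  rw [h1, show ((i : Int) + 1) = ((i + 1 : Nat) : Int) by push_cast; ring,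
      PySem.List.pyGetD_natCast, List.getD_eq_getElem?_getD]

theorem pvS_row_mod (m off : Nat) (l : List Int) (h : m + off + 2 ≤ l.length) :
    PySem.Int.mod (pvS m off (pvPairRow l)) 10
      = PySem.Int.mod (pvS m off l + pvS m (off + 1) l) 10 := by
  rw [PySem.Int.mod_eq_emod_of_pos (by norm_num : (0:Int) < 10),
      PySem.Int.mod_eq_emod_of_pos (by norm_num : (0:Int) < 10)]
  have hsum : pvS m off l + pvS m (off + 1) l
      = ∑ i ∈ Finset.range (m + 1),
          ((m.choose i : Nat) : Int) * (l.getD (i + off) 0 + l.getD (i + off + 1) 0) := by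
    unfold pvS
    rw [← Finset.sum_add_distrib]
    apply Finset.sum_congr rfl
    intro i _
    have hidx : i + (off + 1) = i + off + 1 := by omega
    rw [hidx, mul_add]
  rw [hsum]
  unfold pvS
  apply Int.ModEq.sum
  intro i hi
  have hib : i + off < l.length - 1 := by
    simp only [Finset.mem_range] at hi; omega
  rw [pvPairRow_getD l (i + off) hib,
      PySem.Int.mod_eq_emod_of_pos (by norm_num : (0:Int) < 10)]
  exact Int.ModEq.mul (Int.ModEq.refl _) (Int.emod_emod _ _)

theorem pvA_closed (l : List Int) (h : 3 ≤ l.length) :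
    name_compatibility l
      = PySem.Int.toStr (PySem.Int.mod (pvS (l.length - 2) 0 l) 10)
        ++ PySem.Int.toStr (PySem.Int.mod (pvS (l.length - 2) 1 l) 10) := by
  suffices H : ∀ n, ∀ l : List Int, l.length = n → 3 ≤ n →
      name_compatibility l
        = PySem.Int.toStr (PySem.Int.mod (pvS (n - 2) 0 l) 10)
          ++ PySem.Int.toStr (PySem.Int.mod (pvS (n - 2) 1 l) 10) by
    exact (H l.length l rfl h).trans (by rfl)
  intro n
  induction n using Nat.strong_induction_on with
  | _ n IH =>
    intro l hlen h3
    rw [name_compatibility, if_neg (by omega)]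
    by_cases h4 : n = 3
    · subst h4
      have hrl : (pvPairRow l).length = 2 := by rw [pvPairRow_length]; omega
      rw [name_compatibility, if_pos (by rw [hrl]; norm_num)]
      have g0 : PySem.List.pyGetD (pvPairRow l) 0 0 = (pvPairRow l).getD 0 0 :=
        PySem.List.pyGetD_zero _ _
      have g1 : PySem.List.pyGetD (pvPairRow l) 1 0 = (pvPairRow l).getD 1 0 := by
        rw [show (1 : Int) = ((1 : Nat) : Int) from rfl, PySem.List.pyGetD_natCast]
      rw [g0, g1, pvPairRow_getD l 0 (by omega), pvPairRow_getD l 1 (by omega)]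
      have s0 : pvS 1 0 l = l.getD 0 0 + l.getD 1 0 := by
        simp [pvS, Finset.sum_range_succ]
      have s1 : pvS 1 1 l = l.getD 1 0 + l.getD 2 0 := by
        simp [pvS, Finset.sum_range_succ]
      rw [s0, s1]
    · have h5 : 4 ≤ n := by omega
      rw [IH (n - 1) (by omega) (pvPairRow l) (by rw [pvPairRow_length]; omega) (by omega)]
      have e0 := pvS_row_mod (n - 3) 0 l (by omega)
      have e1 := pvS_row_mod (n - 3) 1 l (by omega)
      rw [show n - 1 - 2 = n - 3 from by omega, e0, e1,
          show n - 2 = (n - 3) + 1 from by omega, pvS_pascal, pvS_pascal]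

theorem pvB_loop (l : List Int) (h3 : 3 ≤ l.length) :
    ∀ k j : Nat, j + k = (l.length - 2) + 1 →
    (PySem.List.pyRange (j : Int) ((l.length : Int) - 2 + 1) 1).foldl
      (fun (st : Int × Int × Int) i =>
        (st.1 + st.2.2 * PySem.List.pyGetD l i 0,
         st.2.1 + st.2.2 * PySem.List.pyGetD l (i + 1) 0,
         PySem.Int.floordiv (st.2.2 * (((l.length : Int) - 2) - i)) (i + 1)))
      (∑ i ∈ Finset.range j, (((l.length - 2).choose i : Nat) : Int) * l.getD (i + 0) 0,
       ∑ i ∈ Finset.range j, (((l.length - 2).choose i : Nat) : Int) * l.getD (i + 1) 0,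
       (((l.length - 2).choose j : Nat) : Int))
    = (pvS (l.length - 2) 0 l, pvS (l.length - 2) 1 l, 0) := by
  intro k
  induction k with
  | zero =>
    intro j hj
    have hrange : PySem.List.pyRange (j : Int) ((l.length : Int) - 2 + 1) 1 = [] := by
      apply PySem.List.pyRange_one_eq_nil
      omega
    rw [hrange]
    simp only [List.foldl_nil]
    have hj' : j = (l.length - 2) + 1 := by omega
    subst hj'
    have hc : (l.length - 2).choose ((l.length - 2) + 1) = 0 := Nat.choose_succ_self _
    rw [hc]
    simp [pvS]
  | succ k IHk =>
    intro j hj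
    have hjm : j ≤ l.length - 2 := by omega
    have hcons : PySem.List.pyRange (j : Int) ((l.length : Int) - 2 + 1) 1
        = (j : Int) :: PySem.List.pyRange ((j : Int) + 1) ((l.length : Int) - 2 + 1) 1 := by
      apply PySem.List.pyRange_one_cons
      omega
    rw [hcons, List.foldl_cons]
    have hstep :
        ((∑ i ∈ Finset.range j, (((l.length - 2).choose i : Nat) : Int) * l.getD (i + 0) 0)
           + (((l.length - 2).choose j : Nat) : Int) * PySem.List.pyGetD l (j : Int) 0,
         (∑ i ∈ Finset.range j, (((l.length - 2).choose i : Nat) : Int) * l.getD (i + 1) 0)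
           + (((l.length - 2).choose j : Nat) : Int) * PySem.List.pyGetD l ((j : Int) + 1) 0,
         PySem.Int.floordiv ((((l.length - 2).choose j : Nat) : Int) * (((l.length : Int) - 2) - (j : Int))) ((j : Int) + 1))
        = (∑ i ∈ Finset.range (j + 1), (((l.length - 2).choose i : Nat) : Int) * l.getD (i + 0) 0,
           ∑ i ∈ Finset.range (j + 1), (((l.length - 2).choose i : Nat) : Int) * l.getD (i + 1) 0,
           (((l.length - 2).choose (j + 1) : Nat) : Int)) := by
      refine Prod.ext ?_ (Prod.ext ?_ ?_)
      · simp [Finset.sum_range_succ, PySem.List.pyGetD_natCast]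
      · simp only [Finset.sum_range_succ]
        rw [show ((j : Int) + 1) = ((j + 1 : Nat) : Int) from by push_cast; ring,
            PySem.List.pyGetD_natCast]
      · have hcast1 : ((l.length : Int) - 2) - (j : Int) = (((l.length - 2) - j : Nat) : Int) := by
          push_cast
          omega
        have hch : (l.length - 2).choose j * (l.length - 2 - j) / (j + 1)
            = (l.length - 2).choose (j + 1) := by
          rw [← Nat.choose_succ_right_eq, Nat.mul_div_cancel _ (by omega : 0 < j + 1)]
        rw [hcast1, show ((j : Int) + 1) = ((j + 1 : Nat) : Int) from by push_cast; ring,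
            ← Nat.cast_mul, PySem.Int.floordiv_natCast, hch]
    rw [hstep]
    exact IHk (j + 1) (by omega)

theorem pvB_closed (l : List Int) (h : 3 ≤ l.length) :
    name_compatibility_alt l
      = PySem.Int.toStr (PySem.Int.mod (pvS (l.length - 2) 0 l) 10)
        ++ PySem.Int.toStr (PySem.Int.mod (pvS (l.length - 2) 1 l) 10) := by
  have hloop := pvB_loop l h ((l.length - 2) + 1) 0 (by omega)
  simp only [Finset.range_zero, Finset.sum_empty, Nat.choose_zero_right, Nat.cast_one,
    Nat.cast_zero] at hloop
  have hne : ¬ ((l.length : Int) ≤ 2) := by omega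
  simp only [name_compatibility_alt, if_neg hne]
  rw [hloop]

-- ===== VERDICT (by name: the statement is the Claim_ definition above) =====
theorem name_compatibility_spec : Claim_equal_name_compatibility := by
  intro lst _ hpre
  unfold Spec_name_compatibility
  by_cases h3 : 3 ≤ lst.length
  · rw [pvA_closed lst h3, pvB_closed lst h3]
  · have h2 : lst.length = 2 := by
      unfold Pre_name_compatibility at hpre; omega
    rw [name_compatibility, name_compatibility_alt]
    simp [h2]
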